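-- pv_equiv track=rewrite | github.com/alexeygrigorev/merm | src/pymermaid/layout/__init__.py | _group_subgraph_nodes_in_layers
-- ===== SOURCE A (Python) =====
-- def _group_subgraph_nodes_in_layers(
--     layer_lists: list[list[str]],
--     node_to_sg: dict[str, str],
-- ) -> list[list[str]]:
--     """Reorder nodes within each layer so that nodes belonging to the same
--     subgraph are contiguous."""
--     result: list[list[str]] = []
--     for layer_nodes in layer_lists:
--         # Stable sort: group by subgraph id (None for no subgraph)
--         # Preserve relative order within each group.
--         groups: dict[str | None, list[str]] = {}
--         order: list[str | None] = []
--         for n in layer_nodes: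
--             sg_id = node_to_sg.get(n)
--             if sg_id not in groups:
--                 groups[sg_id] = []
--                 order.append(sg_id)
--             groups[sg_id].append(n)
--         new_layer: list[str] = []
--         for sg_id in order:
--             new_layer.extend(groups[sg_id])
--         result.append(new_layer)
--     return result
-- ===== SOURCE B (Python) =====
-- def _group_subgraph_nodes_in_layers(
--     layer_lists: list[list[str]],
--     node_to_sg: dict[str, str],
-- ) -> list[list[str]]:
--     """Reorder nodes within each layer so that nodes belonging to the same
--     subgraph are contiguous."""
--     def reorder(layer: list[str]) -> list[str]:
--         keys = list(dict.fromkeys(node_to_sg.get(n) for n in layer))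
--         return [n for k in keys for n in layer if node_to_sg.get(n) == k]
--     return [reorder(layer) for layer in layer_lists]
-- ===== Notes on version B (the rewrite author's own statement) =====
-- stated objective: simpler
-- what changed: Replaces the mutable groups-dict-plus-order-list accumulation and final concatenation with a stateless two-step per layer: dedup the subgraph keys in first-occurrence order (dict.fromkeys), then emit one filter pass of the layer per key via a comprehension.
import Mathlib
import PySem

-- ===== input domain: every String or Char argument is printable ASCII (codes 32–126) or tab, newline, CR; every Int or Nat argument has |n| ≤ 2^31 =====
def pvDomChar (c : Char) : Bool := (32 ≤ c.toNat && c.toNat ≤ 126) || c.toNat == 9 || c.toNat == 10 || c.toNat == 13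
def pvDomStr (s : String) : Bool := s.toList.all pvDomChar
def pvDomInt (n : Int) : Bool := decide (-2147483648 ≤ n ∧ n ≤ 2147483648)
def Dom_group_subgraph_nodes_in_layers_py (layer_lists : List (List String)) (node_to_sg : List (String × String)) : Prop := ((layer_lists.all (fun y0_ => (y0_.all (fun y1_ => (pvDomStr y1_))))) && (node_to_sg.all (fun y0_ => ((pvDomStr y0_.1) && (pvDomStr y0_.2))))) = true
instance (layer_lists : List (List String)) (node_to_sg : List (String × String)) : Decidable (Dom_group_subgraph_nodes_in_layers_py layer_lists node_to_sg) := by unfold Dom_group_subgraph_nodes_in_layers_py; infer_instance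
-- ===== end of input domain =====

-- B replaces A's mutable groups-dict-plus-order-list accumulation with a stateless
-- dedup-keys-then-filter-per-key comprehension per layer ('simpler'; same return values).

-- ===== PORT A =====
-- one step of A's inner 'for n in layer_nodes' loop over the state (groups, order)
def pvAStep (ntg : PySem.Dict String String)
    (st : PySem.Dict (Option String) (List String) × List (Option String)) (n : String) :
    PySem.Dict (Option String) (List String) × List (Option String) :=
  let sgId := ntg.get? n
  let st1 := if st.1.contains sgId then st else (st.1.insert sgId [], st.2 ++ [sgId])
  (st1.1.modify sgId [] (· ++ [n]), st1.2)

def group_subgraph_nodes_in_layers_py (layer_lists : List (List String)) (node_to_sg : List (String × String)) : List (List String) :=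
  let ntg := PySem.Dict.ofList node_to_sg
  layer_lists.foldl (fun result layer_nodes =>
    let st := layer_nodes.foldl (pvAStep ntg) (PySem.Dict.empty, [])
    -- 'groups[sg_id]' : the key is always present (every sg_id in order was inserted), so
    -- KeyError is unreachable; getD [] is exact here.
    let newLayer := st.2.foldl (fun acc sgId => acc ++ st.1.getD sgId []) []
    result ++ [newLayer]) []

-- ===== PORT B =====
def group_subgraph_nodes_in_layers_py_alt (layer_lists : List (List String)) (node_to_sg : List (String × String)) : List (List String) :=
  let ntg := PySem.Dict.ofList node_to_sg
  layer_lists.map (fun layer =>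
    (PySem.List.dedup (layer.map (fun n => ntg.get? n))).flatMap
      (fun k => layer.filter (fun n => ntg.get? n == k)))

-- ===== PRECONDITION & SPEC =====
def Spec_group_subgraph_nodes_in_layers_py (layer_lists : List (List String)) (node_to_sg : List (String × String)) (out : List (List String)) : Prop := out = group_subgraph_nodes_in_layers_py_alt layer_lists node_to_sg
instance (layer_lists : List (List String)) (node_to_sg : List (String × String)) (out : List (List String)) : Decidable (Spec_group_subgraph_nodes_in_layers_py layer_lists node_to_sg out) := by unfold Spec_group_subgraph_nodes_in_layers_py; infer_instance

-- ===== CLAIM (what is proved, stated in full; the proofs are below) =====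
def Claim_equal_group_subgraph_nodes_in_layers_py : Prop := ∀ (layer_lists : List (List String)) (node_to_sg : List (String × String)), Dom_group_subgraph_nodes_in_layers_py layer_lists node_to_sg → Spec_group_subgraph_nodes_in_layers_py layer_lists node_to_sg (group_subgraph_nodes_in_layers_py layer_lists node_to_sg)

-- ===== LEMMAS AND PROOFS =====

-- Invariant of A's inner loop after processing p: order = dedup of the keys of p,
-- contains mirrors membership in the processed keys, and each bucket is a filter of p.
theorem pvAStep_loop (ntg : PySem.Dict String String) (p : List String) :
    (p.foldl (pvAStep ntg) (PySem.Dict.empty, [])).2 = PySem.List.dedup (p.map (fun n => ntg.get? n)) ∧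
    (∀ k, (p.foldl (pvAStep ntg) (PySem.Dict.empty, [])).1.contains k
        = decide (k ∈ p.map (fun n => ntg.get? n))) ∧
    (∀ k, (p.foldl (pvAStep ntg) (PySem.Dict.empty, [])).1.getD k []
        = p.filter (fun n => ntg.get? n == k)) := by
  induction p using List.reverseRecOn with
  | nil =>
    refine ⟨by simp [PySem.List.dedup], fun k => by simp, fun k => by simp⟩
  | append_singleton p n ih =>
    obtain ⟨ih1, ih2, ih3⟩ := ih
    rw [List.foldl_append]
    simp only [List.foldl_cons, List.foldl_nil]
    set st := p.foldl (pvAStep ntg) (PySem.Dict.empty, []) with hst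
    have hdedup : PySem.List.dedup ((p ++ [n]).map (fun m => ntg.get? m))
        = PySem.Set.add (PySem.List.dedup (p.map (fun m => ntg.get? m))) (ntg.get? n) := by
      simp only [List.map_append, List.map_cons, List.map_nil,
        PySem.List.dedup_eq_ofList, PySem.Set.ofList_eq_foldl, List.foldl_append,
        List.foldl_cons, List.foldl_nil]
    by_cases hc : (ntg.get? n) ∈ p.map (fun m => ntg.get? m)
    · have hcon : st.1.contains (ntg.get? n) = true := by rw [ih2]; simp [hc]
      have hmem : ntg.get? n ∈ PySem.List.dedup (p.map (fun m => ntg.get? m)) := by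
        simpa [PySem.List.dedup_eq_ofList] using
          (PySem.Set.mem_ofList (p.map (fun m => ntg.get? m)) (ntg.get? n)).2 hc
      refine ⟨?_, fun k => ?_, fun k => ?_⟩
      · simp only [pvAStep, hcon, if_true]
        rw [hdedup, ← ih1]
        rw [ih1]
        simp only [PySem.Set.add, PySem.Set.contains]
        have hct : (PySem.List.dedup (p.map (fun m => ntg.get? m))).contains (ntg.get? n) = true := by
          simpa using hmem
        simp only [hct]
        simp
      · simp only [pvAStep, hcon, if_true, PySem.Dict.contains_modify]
        rw [ih2]
        by_cases hk : k = ntg.get? n <;> simp [hk, hc]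
      · simp only [pvAStep, hcon, if_true, PySem.Dict.getD_modify]
        rw [List.filter_append]
        simp only [List.filter_cons, List.filter_nil]
        by_cases hk : k = ntg.get? n
        · simp [hk, ih3]
        · simp [hk, Ne.symm hk, beq_iff_eq, ih3]
    · have hcon : st.1.contains (ntg.get? n) = false := by rw [ih2]; simp [hc]
      have hmem : ntg.get? n ∉ PySem.List.dedup (p.map (fun m => ntg.get? m)) := by
        simpa [PySem.List.dedup_eq_ofList,
          PySem.Set.mem_ofList (p.map (fun m => ntg.get? m)) (ntg.get? n)] using hc
      refine ⟨?_, fun k => ?_, fun k => ?_⟩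
      · simp only [pvAStep, hcon, Bool.false_eq_true, if_false]
        rw [hdedup, ← ih1]
        rw [ih1]
        have hcf : (PySem.List.dedup (p.map (fun m => ntg.get? m))).contains (ntg.get? n) = false := by
          simpa using hmem
        simp only [PySem.Set.add, PySem.Set.contains]
        simp only [hcf]
        simp
      · simp only [pvAStep, hcon, Bool.false_eq_true, if_false, PySem.Dict.contains_modify]
        rw [PySem.Dict.contains_insert, ih2]
        by_cases hk : k = ntg.get? n <;> simp [hk, hc]
      · simp only [pvAStep, hcon, Bool.false_eq_true, if_false, PySem.Dict.getD_modify]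
        rw [List.filter_append]
        simp only [List.filter_cons, List.filter_nil]
        by_cases hk : k = ntg.get? n
        · have hfil : p.filter (fun m => ntg.get? m == ntg.get? n) = [] := by
            rw [List.filter_eq_nil_iff]
            intro m hm
            simp only [beq_iff_eq]
            intro he
            exact hc (List.mem_map.2 ⟨m, hm, he⟩)
          rw [hk, PySem.Dict.getD_insert]
          simp [hfil]
        · simp [PySem.Dict.getD_insert, hk, Ne.symm hk, beq_iff_eq, ih3]

theorem layer_eq (ntg : PySem.Dict String String) (layer : List String) :
    (layer.foldl (pvAStep ntg) (PySem.Dict.empty, [])).2.foldl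
      (fun acc sgId => acc ++ (layer.foldl (pvAStep ntg) (PySem.Dict.empty, [])).1.getD sgId []) []
    = (PySem.List.dedup (layer.map (fun n => ntg.get? n))).flatMap
        (fun k => layer.filter (fun n => ntg.get? n == k)) := by
  obtain ⟨h2, _, h3⟩ := pvAStep_loop ntg layer
  simp only [PySem.List.foldl_append_eq_flatMap, List.nil_append, h2]
  exact List.flatMap_congr (fun k _ => h3 k)

-- ===== VERDICT (by name: the statement is the Claim_ definition above) =====
theorem group_subgraph_nodes_in_layers_py_spec : Claim_equal_group_subgraph_nodes_in_layers_py := by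
  intro layer_lists node_to_sg _
  unfold Spec_group_subgraph_nodes_in_layers_py group_subgraph_nodes_in_layers_py
    group_subgraph_nodes_in_layers_py_alt
  rw [PySem.List.foldl_append_singleton_eq_map]
  exact List.map_congr_left (fun layer _ => layer_eq _ layer)
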